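-- pv_equiv track=rewrite | github.com/8none1/lednetwf_ble | tools/ble_scanner.py | get_manufacturer_id_status
-- ===== SOURCE A (Python) =====
-- VALID_MANUFACTURER_ID_MIN = 0x5A00  # 23040
--
-- VALID_MANUFACTURER_ID_MAX = 0x5AFF  # 23295
--
-- EXACT_MATCH_IDS = set(range(23123, 23134))  # 23123-23133
--
-- VALID_RANGES = [
--     (23120, 23122),   # Primary: 0x5A50-0x5A52
--     (23072, 23087),   # Range 1: 0x5A20-0x5A2F
--     (23136, 23151),   # Range 2: 0x5A60-0x5A6F
--     (23152, 23167),   # Range 3: 0x5A70-0x5A7F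
--     (23168, 23183),   # Range 4: 0x5A80-0x5A8F
-- ]
--
-- def get_manufacturer_id_status(manu_id: int) -> str:
--     """
--     Check manufacturer ID against known ranges and return a status string.
--
--     Returns:
--         "known" - ID is in the documented valid ranges
--         "extended" - ID is in the broader 0x5A00-0x5AFF range (likely valid)
--         "unknown" - ID is outside all expected ranges
--     """
--     # Check exact matches first
--     if manu_id in EXACT_MATCH_IDS:
--         return "known"
--
--     # Check specific documented ranges
--     for range_min, range_max in VALID_RANGES:
--         if range_min <= manu_id <= range_max:
--             return "known"
--
--     # Check broader 0x5A00-0x5AFF range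
--     if VALID_MANUFACTURER_ID_MIN <= manu_id <= VALID_MANUFACTURER_ID_MAX:
--         return "extended"
--
--     return "unknown"
-- ===== SOURCE B (Python) =====
-- VALID_MANUFACTURER_ID_MIN = 0x5A00  # 23040
-- VALID_MANUFACTURER_ID_MAX = 0x5AFF  # 23295
--
-- # Precomputed status table for the whole 0x5A00-0x5AFF window:
-- # start with "extended" everywhere, then mark the documented ids "known".
-- _TABLE = ["extended"] * 256
-- for _i in range(23123, 23134):  # exact-match ids
--     _TABLE[_i - VALID_MANUFACTURER_ID_MIN] = "known"
-- for _lo, _hi in [(23120, 23122), (23072, 23087), (23136, 23151),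
--                  (23152, 23167), (23168, 23183)]:
--     for _i in range(_lo, _hi + 1):
--         _TABLE[_i - VALID_MANUFACTURER_ID_MIN] = "known"
--
-- def get_manufacturer_id_status(manu_id: int) -> str:
--     if VALID_MANUFACTURER_ID_MIN <= manu_id <= VALID_MANUFACTURER_ID_MAX:
--         return _TABLE[manu_id - VALID_MANUFACTURER_ID_MIN]
--     return "unknown"
-- ===== Notes on version B (the rewrite author's own statement) =====
-- stated objective: simpler
-- what changed: Replaced the exact-match set test plus a scan over five (min,max) ranges by a 256-entry status table precomputed once for the 0x5A00-0x5AFF window; the function is a single bounds check and table lookup.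
import Mathlib
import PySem

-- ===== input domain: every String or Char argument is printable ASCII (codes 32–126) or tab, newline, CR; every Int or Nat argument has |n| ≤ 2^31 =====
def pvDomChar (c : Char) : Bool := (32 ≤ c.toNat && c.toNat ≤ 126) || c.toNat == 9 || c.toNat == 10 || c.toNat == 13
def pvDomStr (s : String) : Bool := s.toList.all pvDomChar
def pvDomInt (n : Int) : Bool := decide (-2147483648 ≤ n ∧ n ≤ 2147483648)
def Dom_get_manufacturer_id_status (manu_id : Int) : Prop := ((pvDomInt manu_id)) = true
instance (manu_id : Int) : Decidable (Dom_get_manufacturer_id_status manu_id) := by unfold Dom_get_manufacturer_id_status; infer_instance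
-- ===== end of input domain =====

-- B replaces A's exact-match set test plus range scan by one precomputed 256-entry
-- status table for the 0x5A00-0x5AFF window (objective: simpler per-call logic).

-- ===== PORT A =====
def pvExactMatchIds : PySem.Set Int := PySem.Set.ofList (PySem.List.pyRange 23123 23134 1)

def pvValidRanges : List (Int × Int) :=
  [(23120, 23122), (23072, 23087), (23136, 23151), (23152, 23167), (23168, 23183)]

-- the 'for range_min, range_max in VALID_RANGES' loop with its early return
def pvRangeLoop (manu_id : Int) : List (Int × Int) → Option String
  | [] => none
  | (rmin, rmax) :: rest =>
      if rmin ≤ manu_id ∧ manu_id ≤ rmax then some "known" else pvRangeLoop manu_id rest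

def get_manufacturer_id_status (manu_id : Int) : String :=
  if PySem.Set.contains pvExactMatchIds manu_id then "known"
  else
    match pvRangeLoop manu_id pvValidRanges with
    | some s => s
    | none =>
        if 23040 ≤ manu_id ∧ manu_id ≤ 23295 then "extended" else "unknown"

-- ===== PORT B =====
def pvAltRanges : List (Int × Int) :=
  [(23120, 23122), (23072, 23087), (23136, 23151), (23152, 23167), (23168, 23183)]

-- _TABLE as built at module load: "extended" everywhere, then "known" at the documented ids
def pvTable : List String :=
  let t0 := List.replicate 256 "extended"
  let t1 := (PySem.List.pyRange 23123 23134 1).foldl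
              (fun t i => PySem.List.pySetD t (i - 23040) "known") t0
  pvAltRanges.foldl
    (fun t p => (PySem.List.pyRange p.1 (p.2 + 1) 1).foldl
                  (fun t i => PySem.List.pySetD t (i - 23040) "known") t) t1

def get_manufacturer_id_status_alt (manu_id : Int) : String :=
  if 23040 ≤ manu_id ∧ manu_id ≤ 23295 then
    -- the guard makes the index in range, so the Python lookup never raises
    PySem.List.pyGetD pvTable (manu_id - 23040) "unknown"
  else "unknown"

-- ===== PRECONDITION & SPEC =====
def Spec_get_manufacturer_id_status (manu_id : Int) (out : String) : Prop := out = get_manufacturer_id_status_alt manu_id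
instance (manu_id : Int) (out : String) : Decidable (Spec_get_manufacturer_id_status manu_id out) := by unfold Spec_get_manufacturer_id_status; infer_instance

-- ===== CLAIM (what is proved, stated in full; the proofs are below) =====
def Claim_equal_get_manufacturer_id_status : Prop := ∀ (manu_id : Int), Dom_get_manufacturer_id_status manu_id → Spec_get_manufacturer_id_status manu_id (get_manufacturer_id_status manu_id)

-- ===== LEMMAS AND PROOFS =====

-- inside the 0x5A00-0x5AFF window the two programs agree, checked pointwise
set_option maxRecDepth 8192 in
theorem pv_agree_window : ∀ k : Fin 256,
    get_manufacturer_id_status (23040 + (k : Int)) =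
    get_manufacturer_id_status_alt (23040 + (k : Int)) := by decide

theorem pv_A_outside (m : Int) (h : ¬ (23040 ≤ m ∧ m ≤ 23295)) :
    get_manufacturer_id_status m = "unknown" := by
  have hset : ¬ (PySem.Set.contains pvExactMatchIds m = true) := by
    rw [PySem.Set.contains_iff]
    intro hm
    have he : pvExactMatchIds = [23123, 23124, 23125, 23126, 23127, 23128, 23129, 23130, 23131, 23132, 23133] := by decide
    rw [he] at hm
    simp at hm
    omega
  unfold get_manufacturer_id_status
  rw [if_neg hset]
  simp only [pvValidRanges, pvRangeLoop]
  rw [if_neg (by omega), if_neg (by omega), if_neg (by omega), if_neg (by omega),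
      if_neg (by omega)]
  show (if 23040 ≤ m ∧ m ≤ 23295 then "extended" else "unknown") = "unknown"
  rw [if_neg h]

-- ===== VERDICT (by name: the statement is the Claim_ definition above) =====
theorem get_manufacturer_id_status_spec : Claim_equal_get_manufacturer_id_status := by
  intro m _
  unfold Spec_get_manufacturer_id_status
  by_cases h : 23040 ≤ m ∧ m ≤ 23295
  · obtain ⟨h1, h2⟩ := h
    have hk : m = 23040 + ((⟨(m - 23040).toNat, by omega⟩ : Fin 256) : Int) := by
      simp; omega
    rw [hk]
    exact pv_agree_window _
  · rw [pv_A_outside m h]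
    unfold get_manufacturer_id_status_alt
    rw [if_neg h]
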